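-- pv_equiv track=rewrite | github.com/tsangwpx/leetcode | src/p1xxx/p1913.py | maxProductDifference2
-- ===== SOURCE A (Python) =====
-- from typing import List, Optional
--
-- def maxProductDifference2(nums: List[int]) -> int:
--     from heapq import heapify, heappushpop
--
--     heap_min = [nums[0], nums[1]]
--     heap_min.sort()
--
--     heap_max = [
--         -heappushpop(heap_min, nums[2]),
--         -heappushpop(heap_min, nums[3]),
--     ]
--     heap_max.sort()
--
--     for number in nums[4:]:
--         number = heappushpop(heap_min, number)
--         _ = heappushpop(heap_max, -number)
--
--     return heap_min[0] * heap_min[1] - heap_max[0] * heap_max[1]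
-- ===== SOURCE B (Python) =====
-- def maxProductDifference2(nums):
--     s = sorted(nums)
--     return s[-1] * s[-2] - s[0] * s[1]
-- ===== Notes on version B (the rewrite author's own statement) =====
-- stated objective: simpler
-- what changed: Replaces A's single pass with two 2-element heaps (heapify/heappushpop bookkeeping) by sorting a copy and indexing the two largest and two smallest elements directly.
import Mathlib
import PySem

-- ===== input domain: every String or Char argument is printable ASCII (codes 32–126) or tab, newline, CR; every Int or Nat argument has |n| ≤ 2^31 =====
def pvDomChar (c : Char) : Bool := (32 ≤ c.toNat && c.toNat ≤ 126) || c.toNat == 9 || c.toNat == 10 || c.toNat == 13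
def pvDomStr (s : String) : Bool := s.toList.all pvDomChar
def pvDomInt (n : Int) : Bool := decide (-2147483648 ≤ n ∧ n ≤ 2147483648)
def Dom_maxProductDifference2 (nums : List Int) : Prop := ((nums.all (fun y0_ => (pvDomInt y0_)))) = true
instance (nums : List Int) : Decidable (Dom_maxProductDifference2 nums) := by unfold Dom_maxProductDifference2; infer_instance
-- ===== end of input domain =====

-- B replaces A's single pass with two 2-element heappushpop heaps by sorting a
-- copy and indexing the two largest and two smallest elements; equal on every
-- list of length ≥ 4 (A raises IndexError on shorter lists).

-- ===== PORT A =====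
-- heappushpop on a 2-element min-heap (h.1, h.2) with h.1 ≤ h.2: (ejected, new heap)
def hppA (h : Int × Int) (x : Int) : Int × (Int × Int) :=
  if h.1 < x then (h.1, (min h.2 x, max h.2 x)) else (x, h)

-- one iteration of A's loop body over the state (heap_min, heap_max)
def stepA (st : (Int × Int) × (Int × Int)) (n : Int) : (Int × Int) × (Int × Int) :=
  let p := hppA st.1 n
  let q := hppA st.2 (-p.1)
  (p.2, q.2)

def maxProductDifference2 (nums : List Int) : Int :=
  match nums with
  | n0 :: n1 :: n2 :: n3 :: rest =>
    let heapMin0 : Int × Int := (min n0 n1, max n0 n1)   -- [nums[0], nums[1]].sort()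
    let p1 := hppA heapMin0 n2
    let p2 := hppA p1.2 n3
    let heapMax0 : Int × Int := (min (-p1.1) (-p2.1), max (-p1.1) (-p2.1))
    let fin := rest.foldl stepA (p2.2, heapMax0)         -- for number in nums[4:]
    fin.1.1 * fin.1.2 - fin.2.1 * fin.2.2
  | _ => 0   -- unreachable under Pre_ (Python raises IndexError)

-- ===== PORT B =====
def maxProductDifference2_alt (nums : List Int) : Int :=
  let s := PySem.List.sorted nums (fun x => x) false
  match PySem.List.pyGet? s (-1), PySem.List.pyGet? s (-2),
        PySem.List.pyGet? s 0, PySem.List.pyGet? s 1 with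
  | some a, some b, some c, some d => a * b - c * d
  | _, _, _, _ => 0   -- unreachable under Pre_ (Python raises IndexError)

-- ===== PRECONDITION & SPEC =====
-- Pre_ excludes exactly the lists of length < 4, on which A raises IndexError.
def Pre_maxProductDifference2 (nums : List Int) : Prop := 4 ≤ nums.length
instance (nums : List Int) : Decidable (Pre_maxProductDifference2 nums) := by
  unfold Pre_maxProductDifference2; infer_instance

def pvWitness_maxProductDifference2 : List Int := [1, 2, 3, 4]

def Spec_maxProductDifference2 (nums : List Int) (out : Int) : Prop := out = maxProductDifference2_alt nums
instance (nums : List Int) (out : Int) : Decidable (Spec_maxProductDifference2 nums out) := by unfold Spec_maxProductDifference2; infer_instance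

-- ===== CLAIM (what is proved, stated in full; the proofs are below) =====
def Claim_equal_maxProductDifference2 : Prop := ∀ (nums : List Int), Dom_maxProductDifference2 nums → Pre_maxProductDifference2 nums → Spec_maxProductDifference2 nums (maxProductDifference2 nums)

-- ===== LEMMAS AND PROOFS =====

-- Invariant of A's loop over the processed prefix P:
-- st.1 holds the two largest elements of P (sorted), st.2 the negated two smallest.
def InvA (P : List Int) (st : (Int × Int) × (Int × Int)) : Prop :=
  st.1.1 ≤ st.1.2 ∧ st.2.1 ≤ st.2.2 ∧ -st.2.1 ≤ st.1.1 ∧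
  (∃ r, P.Perm (st.1.1 :: st.1.2 :: r) ∧ ∀ x ∈ r, x ≤ st.1.1) ∧
  (∃ s, P.Perm ((-st.2.2) :: (-st.2.1) :: s) ∧ ∀ x ∈ s, -st.2.1 ≤ x)

lemma perm3_rot (x y z : Int) : ([x, y, z] : List Int).Perm [z, x, y] :=
  ((List.Perm.swap x z [y]).trans ((List.Perm.swap y z []).cons x)).symm

lemma hppA_spec (a b n : Int) (hab : a ≤ b) :
    (hppA (a, b) n).2.1 ≤ (hppA (a, b) n).2.2 ∧
    a ≤ (hppA (a, b) n).2.1 ∧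
    (hppA (a, b) n).1 = min a n ∧
    [(hppA (a, b) n).1, (hppA (a, b) n).2.1, (hppA (a, b) n).2.2].Perm [n, a, b] := by
  unfold hppA
  split_ifs with h
  · rcases le_total b n with h1 | h1
    · rw [min_eq_left h1, max_eq_right h1]
      exact ⟨h1, hab, (min_eq_left h.le).symm, perm3_rot a b n⟩
    · rw [min_eq_right h1, max_eq_left h1]
      exact ⟨h1, h.le, (min_eq_left h.le).symm, List.Perm.swap n a [b]⟩
  · exact ⟨hab, le_refl a, (min_eq_right (le_of_not_gt h)).symm, List.Perm.refl _⟩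

lemma perm_push (P : List Int) (x y n : Int) (r : List Int) (hP : P.Perm (x :: y :: r)) :
    (P ++ [n]).Perm (x :: y :: n :: r) :=
  (hP.append_right [n]).trans (((List.perm_append_singleton n r).cons y).cons x)

lemma perm_pre3 {x y z x' y' z' : Int} (t : List Int) (h : ([x, y, z] : List Int).Perm [x', y', z']) :
    (x :: y :: z :: t).Perm (x' :: y' :: z' :: t) := h.append_right t


lemma neg_min' (a b : Int) : -(min a b) = max (-a) (-b) := by
  simp only [min_def, max_def]; split_ifs <;> omega

lemma neg_max' (a b : Int) : -(max a b) = min (-a) (-b) := by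
  simp only [min_def, max_def]; split_ifs <;> omega

lemma invA_step (P : List Int) (st : (Int × Int) × (Int × Int)) (n : Int)
    (h : InvA P st) : InvA (P ++ [n]) (stepA st n) := by
  obtain ⟨⟨a, b⟩, ⟨c, d⟩⟩ := st
  obtain ⟨hab, hcd, hca, ⟨r, hPr, hr⟩, ⟨s, hPs, hs⟩⟩ := h
  simp only at hab hcd hca hPr hr hPs hs
  have spec := hppA_spec a b n hab
  rcases hE : hppA (a, b) n with ⟨e, m1, m2⟩
  rw [hE] at spec
  obtain ⟨h1, h2, h3, h4⟩ := spec
  simp only at h1 h2 h3 h4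
  have hgoal : stepA ((a, b), (c, d)) n = ((m1, m2), (hppA (c, d) (-e)).2) := by
    simp only [stepA, hE]
  rw [hgoal]
  have hea : e ≤ a := by rw [h3]; exact min_le_left a n
  have hne : e ≤ n := by rw [h3]; exact min_le_right a n
  -- top decomposition
  have htop : (P ++ [n]).Perm (m1 :: m2 :: e :: r) :=
    (perm_push P a b n r hPr).trans
      ((perm_pre3 r ((perm3_rot a b n).trans h4.symm)).trans
        (perm_pre3 r (perm3_rot m1 m2 e).symm))
  have htopb : ∀ x ∈ e :: r, x ≤ m1 := by
    intro x hx
    rcases List.mem_cons.mp hx with hx | hx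
    · subst hx; exact le_trans hea h2
    · exact le_trans (hr x hx) h2
  by_cases hcase : c < -e
  · -- bottom heap changes; here e = n and n < -c
    have hen : e = n := by
      rcases min_choice a n with hmin | hmin
      · exfalso; rw [h3] at hcase; omega
      · rw [h3, hmin]
    subst hen
    have hnc : e < -c := by omega
    have hq : hppA (c, d) (-e) = (c, (min d (-e), max d (-e))) := by
      unfold hppA; rw [if_pos hcase]
    rw [hq]
    refine ⟨h1, min_le_max, ?_, ⟨e :: r, htop, htopb⟩, ⟨(-c) :: s, ?_, ?_⟩⟩
    · simp only [neg_min', neg_neg]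
      have hda : -d ≤ m1 := by omega
      have hnm : e ≤ m1 := le_trans hea h2
      exact max_le hda hnm
    · simp only [neg_min', neg_max', neg_neg]
      have base : (P ++ [e]).Perm ((-d) :: (-c) :: e :: s) := perm_push P (-d) (-c) e s hPs
      refine base.trans (perm_pre3 s ?_)
      rcases le_total (-d) e with h5 | h5
      · rw [min_eq_left h5, max_eq_right h5]
        exact (List.Perm.swap e (-c) []).cons (-d)
      · rw [min_eq_right h5, max_eq_left h5]
        exact perm3_rot (-d) (-c) e
    · simp only [neg_min', neg_neg]
      intro x hx
      have hmaxle : max (-d) e ≤ -c := max_le (by omega) (by omega)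
      rcases List.mem_cons.mp hx with hx | hx
      · subst hx; exact hmaxle
      · exact le_trans hmaxle (hs x hx)
  · -- bottom heap unchanged
    have hq : hppA (c, d) (-e) = (-e, (c, d)) := by
      unfold hppA; rw [if_neg hcase]
    rw [hq]
    dsimp only
    refine ⟨h1, hcd, by show -c ≤ m1; omega, ⟨e :: r, htop, htopb⟩, ⟨n :: s, perm_push P (-d) (-c) n s hPs, ?_⟩⟩
    intro x hx
    rcases List.mem_cons.mp hx with hx | hx
    · show -c ≤ x; omega
    · show -c ≤ x; exact hs x hx

lemma perm2_minmax (x y : Int) : ([x, y] : List Int).Perm [min x y, max x y] := by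
  rcases le_total x y with h | h
  · rw [min_eq_left h, max_eq_right h]
  · rw [min_eq_right h, max_eq_left h]; exact List.Perm.swap y x []

lemma invA_init (n0 n1 n2 n3 : Int) :
    InvA [n0, n1, n2, n3]
      ((hppA (hppA (min n0 n1, max n0 n1) n2).2 n3).2,
       (min (-(hppA (min n0 n1, max n0 n1) n2).1) (-(hppA (hppA (min n0 n1, max n0 n1) n2).2 n3).1),
        max (-(hppA (min n0 n1, max n0 n1) n2).1) (-(hppA (hppA (min n0 n1, max n0 n1) n2).2 n3).1))) := by
  have spec1 := hppA_spec (min n0 n1) (max n0 n1) n2 min_le_max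
  rcases hE1 : hppA (min n0 n1, max n0 n1) n2 with ⟨e1, a1, b1⟩
  rw [hE1] at spec1
  dsimp only at spec1 ⊢
  obtain ⟨hab1, hm1, hmin1, hp1⟩ := spec1
  have spec2 := hppA_spec a1 b1 n3 hab1
  rcases hE2 : hppA (a1, b1) n3 with ⟨e2, a2, b2⟩
  rw [hE2] at spec2
  dsimp only at spec2 ⊢
  obtain ⟨hab2, hm2, hmin2, hp2⟩ := spec2
  have he1 : e1 ≤ a1 := le_trans (by rw [hmin1]; exact min_le_left _ _) hm1
  have he2 : e2 ≤ a2 := le_trans (by rw [hmin2]; exact min_le_left _ _) hm2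
  have hperm4 : ([n0, n1, n2, n3] : List Int).Perm [a2, b2, e2, e1] := by
    have s1 : ([n0, n1, n2, n3] : List Int).Perm [min n0 n1, max n0 n1, n2, n3] :=
      (perm2_minmax n0 n1).append_right [n2, n3]
    have s2 : ([min n0 n1, max n0 n1, n2] : List Int).Perm [e1, a1, b1] :=
      (perm3_rot (min n0 n1) (max n0 n1) n2).trans hp1.symm
    have s3 : ([n0, n1, n2, n3] : List Int).Perm (e1 :: a1 :: b1 :: [n3]) :=
      s1.trans (perm_pre3 [n3] s2)
    have s4 : (e1 :: a1 :: b1 :: [n3] : List Int).Perm [a1, b1, n3, e1] :=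
      (List.perm_append_singleton e1 [a1, b1, n3]).symm
    have s5 : ([a1, b1, n3] : List Int).Perm [e2, a2, b2] :=
      (perm3_rot a1 b1 n3).trans hp2.symm
    have s6 : ([a1, b1, n3, e1] : List Int).Perm [e2, a2, b2, e1] := perm_pre3 [e1] s5
    have s7 : ([e2, a2, b2] : List Int).Perm [a2, b2, e2] := (perm3_rot a2 b2 e2).symm
    exact ((s3.trans s4).trans s6).trans (perm_pre3 [e1] s7)
  refine ⟨hab2, min_le_max, ?_, ⟨[e2, e1], hperm4, ?_⟩, ⟨[a2, b2], ?_, ?_⟩⟩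
  · rw [neg_min', neg_neg, neg_neg]
    exact max_le (le_trans he1 hm2) he2
  · intro x hx
    rcases List.mem_cons.mp hx with hx | hx
    · subst hx; exact he2
    · simp at hx; subst hx; exact le_trans he1 hm2
  · rw [neg_min', neg_max', neg_neg, neg_neg]
    have : ([a2, b2, e2, e1] : List Int).Perm ([min e1 e2, max e1 e2] ++ [a2, b2]) := by
      have c1 : ([a2, b2, e2, e1] : List Int).Perm ([e2, e1] ++ [a2, b2]) := by
        have := List.perm_append_comm (l₁ := ([a2, b2] : List Int)) (l₂ := [e2, e1])
        exact this
      have c2 : ([e2, e1] : List Int).Perm [min e1 e2, max e1 e2] :=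
        (List.Perm.swap e1 e2 []).trans (perm2_minmax e1 e2)
      exact c1.trans (c2.append_right [a2, b2])
    exact hperm4.trans this
  · rw [neg_min', neg_neg, neg_neg]
    intro x hx
    rcases List.mem_cons.mp hx with hx | hx
    · subst hx; exact max_le (le_trans he1 hm2) he2
    · simp at hx; subst hx
      exact le_trans (max_le (le_trans he1 hm2) he2) hab2

lemma invA_foldl (l : List Int) (P : List Int) (st : (Int × Int) × (Int × Int))
    (h : InvA P st) : InvA (P ++ l) (l.foldl stepA st) := by
  induction l generalizing P st with
  | nil => simpa using h
  | cons x t ih =>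
    have := ih (P ++ [x]) (stepA st x) (invA_step P st x h)
    simpa using this

lemma sorted_top (P r : List Int) (a b : Int) (hP : P.Perm (a :: b :: r))
    (hab : a ≤ b) (hr : ∀ x ∈ r, x ≤ a) :
    PySem.List.sorted P (fun x => x) false = PySem.List.sorted r (fun x => x) false ++ [a, b] := by
  apply PySem.List.sorted_id_eq_of_perm_of_pairwise
  · exact ((PySem.List.sorted_perm r (fun x => x) false).append_right [a, b]).trans
      ((List.perm_append_comm).trans hP.symm)
  · rw [List.pairwise_append]
    refine ⟨PySem.List.sorted_pairwise r (fun x => x), by simp [hab], ?_⟩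
    intro x hx y hy
    have hxa := hr x ((PySem.List.mem_sorted r (fun x => x) false x).mp hx)
    rcases List.mem_cons.mp hy with hy | hy
    · omega
    · simp at hy; omega

lemma sorted_bot (P s : List Int) (c d : Int) (hP : P.Perm (c :: d :: s))
    (hcd : c ≤ d) (hs : ∀ x ∈ s, d ≤ x) :
    PySem.List.sorted P (fun x => x) false = c :: d :: PySem.List.sorted s (fun x => x) false := by
  apply PySem.List.sorted_id_eq_of_perm_of_pairwise
  · exact ((((PySem.List.sorted_perm s (fun x => x) false)).cons d).cons c).trans hP.symm
  · refine List.pairwise_cons.mpr ⟨?_, List.pairwise_cons.mpr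
      ⟨?_, PySem.List.sorted_pairwise s (fun x => x)⟩⟩
    · intro y hy
      rcases List.mem_cons.mp hy with hy | hy
      · omega
      · have := hs y ((PySem.List.mem_sorted s (fun x => x) false y).mp hy); omega
    · intro y hy; exact hs y ((PySem.List.mem_sorted s (fun x => x) false y).mp hy)

lemma mpd_eq_alt_of_cons4 (n0 n1 n2 n3 : Int) (rest : List Int) :
    maxProductDifference2 (n0 :: n1 :: n2 :: n3 :: rest)
      = maxProductDifference2_alt (n0 :: n1 :: n2 :: n3 :: rest) := by
  have hInv := invA_foldl rest [n0, n1, n2, n3] _ (invA_init n0 n1 n2 n3)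
  have hPform : ([n0, n1, n2, n3] ++ rest : List Int) = n0 :: n1 :: n2 :: n3 :: rest := rfl
  rw [hPform] at hInv
  set nums : List Int := n0 :: n1 :: n2 :: n3 :: rest with hnums
  rcases hF : rest.foldl stepA
      ((hppA (hppA (min n0 n1, max n0 n1) n2).2 n3).2,
       (min (-(hppA (min n0 n1, max n0 n1) n2).1) (-(hppA (hppA (min n0 n1, max n0 n1) n2).2 n3).1),
        max (-(hppA (min n0 n1, max n0 n1) n2).1) (-(hppA (hppA (min n0 n1, max n0 n1) n2).2 n3).1)))
    with ⟨⟨m1, m2⟩, ⟨c, d⟩⟩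
  rw [hF] at hInv
  obtain ⟨h12, hcd, hc1, ⟨r, hPr, hr⟩, ⟨s, hPs, hs⟩⟩ := hInv
  dsimp only at h12 hcd hc1 hPr hr hPs hs
  -- A's value
  have hA : maxProductDifference2 nums = m1 * m2 - c * d := by
    simp only [maxProductDifference2, hnums, hF]
  -- sorted structure
  have hq_top := sorted_top nums r m1 m2 hPr h12 hr
  have hq_bot := sorted_bot nums s (-d) (-c) hPs (by omega) (fun x hx => hs x hx)
  set q : List Int := PySem.List.sorted nums (fun x => x) false with hq
  have hlen : q.length = nums.length := PySem.List.length_sorted nums (fun x => x) false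
  have hget1 : PySem.List.pyGet? q (-1) = some m2 := by
    rw [PySem.List.pyGet?_neg_one, hq_top]
    rw [show (PySem.List.sorted r (fun x => x) false ++ [m1, m2])
          = (PySem.List.sorted r (fun x => x) false ++ [m1]) ++ [m2] by simp]
    exact List.getLast?_concat
  have hlen4 : 2 ≤ q.length := by rw [hlen, hnums]; simp
  have hget2 : PySem.List.pyGet? q (-2) = some m1 := by
    rw [PySem.List.pyGet?_neg_ofNat q 2 (by omega) hlen4]
    have hidx : q.length - 2 = (PySem.List.sorted r (fun x => x) false).length := by
      rw [hq_top]; simp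
    rw [hidx, hq_top, List.getElem?_append_right (le_refl _)]
    simp
  have hget0 : PySem.List.pyGet? q 0 = some (-d) := by
    rw [hq_bot]; exact PySem.List.pyGet?_zero_cons _ _
  have hget3 : PySem.List.pyGet? q 1 = some (-c) := by
    rw [hq_bot, show (1 : Int) = ((1 : Nat) : Int) from rfl, PySem.List.pyGet?_natCast]
    rfl
  have hB : maxProductDifference2_alt nums = m2 * m1 - (-d) * (-c) := by
    simp only [maxProductDifference2_alt, ← hq, hget1, hget2, hget0, hget3]
  rw [hA, hB]; ring


-- ===== VERDICT (by name: the statement is the Claim_ definition above) =====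
theorem maxProductDifference2_spec : Claim_equal_maxProductDifference2 := by
  intro nums hDom hPre
  unfold Spec_maxProductDifference2
  match nums, hPre with
  | n0 :: n1 :: n2 :: n3 :: rest, _ => exact mpd_eq_alt_of_cons4 n0 n1 n2 n3 rest
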